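-- pv_equiv track=rewrite | github.com/MarceloSanC/financial-time-series-forecasting | src/use_cases/generate_prediction_analysis_plots_use_case.py | _dedupe_labels
-- ===== SOURCE A (Python) =====
-- def _dedupe_labels(labels: list[str]) -> list[str]:
--     seen: dict[str, int] = {}
--     out: list[str] = []
--     for lb in labels:
--         seen[lb] = seen.get(lb, 0) + 1
--         n = seen[lb]
--         out.append(lb if n == 1 else f"{lb}#{n}")
--     return out
-- ===== SOURCE B (Python) =====
-- def _dedupe_labels(labels: list[str]) -> list[str]:
--     # Group-then-scatter: collect the positions of every label, then write each
--     # occurrence's final name directly into a pre-allocated output list.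
--     positions: dict[str, list[int]] = {}
--     for i, lb in enumerate(labels):
--         positions.setdefault(lb, []).append(i)
--     out: list[str] = [""] * len(labels)
--     for lb, idxs in positions.items():
--         for k, i in enumerate(idxs):
--             out[i] = lb if k == 0 else f"{lb}#{k + 1}"
--     return out
-- ===== Notes on version B (the rewrite author's own statement) =====
-- stated objective: alternative
-- what changed: Replaces A's single streaming pass with a running seen-count dict by a group-then-scatter algorithm: first collect each label's occurrence positions, then write every occurrence's final suffixed name directly into a pre-allocated output list.
import Mathlib
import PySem

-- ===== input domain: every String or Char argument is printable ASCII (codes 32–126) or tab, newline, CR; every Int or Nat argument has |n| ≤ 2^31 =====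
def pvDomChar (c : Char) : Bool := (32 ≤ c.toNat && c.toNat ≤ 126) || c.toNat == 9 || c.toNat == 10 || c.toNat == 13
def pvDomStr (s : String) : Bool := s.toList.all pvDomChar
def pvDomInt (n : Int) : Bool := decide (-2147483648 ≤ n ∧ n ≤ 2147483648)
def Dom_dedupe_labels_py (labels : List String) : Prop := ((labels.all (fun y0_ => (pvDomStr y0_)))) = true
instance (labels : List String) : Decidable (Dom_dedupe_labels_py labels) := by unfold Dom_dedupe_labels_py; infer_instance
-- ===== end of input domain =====

-- B replaces A's single streaming pass with a running seen-count dict by a group-then-scatter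
-- algorithm: collect every label's occurrence positions, then write each occurrence's final name
-- into a pre-allocated output list (alternative decomposition, same asymptotic cost).


-- ===== PORT A =====
-- for lb in labels: seen[lb] = seen.get(lb, 0) + 1; n = seen[lb]; out.append(...)
def dedupe_labels_py (labels : List String) : List String :=
  (labels.foldl
    (fun (st : PySem.Dict String Int × List String) lb =>
      let seen := st.1.insert lb (st.1.getD lb 0 + 1)
      let n := seen.getD lb 0
      (seen, st.2 ++ [if n == 1 then lb else lb ++ "#" ++ PySem.Int.toStr n]))
    (PySem.Dict.empty, [])).2

-- ===== PORT B =====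
-- Stage 1: 'for i, lb in enumerate(labels): positions.setdefault(lb, []).append(i)'
--   (setdefault+append = positions[lb] = positions.get(lb, []) + [i], i.e. Dict.modify).
-- Stage 2: 'out = [""] * len(labels); for lb, idxs in positions.items():
--             for k, i in enumerate(idxs): out[i] = lb if k == 0 else f"{lb}#{k+1}"'.
def dedupe_labels_py_alt (labels : List String) : List String :=
  let positions :=
    (PySem.List.enumerate labels 0).foldl
      (fun (d : PySem.Dict String (List Int)) p => d.modify p.2 [] (fun l => l ++ [p.1]))
      PySem.Dict.empty
  positions.items.foldl
    (fun (out : List String) pr =>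
      (PySem.List.enumerate pr.2 0).foldl
        (fun (out2 : List String) q =>
          PySem.List.pySetD out2 q.2
            (if q.1 == 0 then pr.1 else pr.1 ++ "#" ++ PySem.Int.toStr (q.1 + 1)))
        out)
    (List.replicate labels.length "")

-- ===== PRECONDITION & SPEC =====
def Spec_dedupe_labels_py (labels : List String) (out : List String) : Prop := out = dedupe_labels_py_alt labels
instance (labels : List String) (out : List String) : Decidable (Spec_dedupe_labels_py labels out) := by unfold Spec_dedupe_labels_py; infer_instance

-- ===== CLAIM (what is proved, stated in full; the proofs are below) =====
def Claim_equal_dedupe_labels_py : Prop := ∀ (labels : List String), Dom_dedupe_labels_py labels → Spec_dedupe_labels_py labels (dedupe_labels_py labels)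

-- ===== LEMMAS AND PROOFS =====

-- common reference value: the labelled output of `rest` after an already-processed prefix `pre`
def dlSpec : List String → List String → List String
  | _, [] => []
  | pre, lb :: rest =>
      let n : Int := (pre.count lb : Int) + 1
      (if n == 1 then lb else lb ++ "#" ++ PySem.Int.toStr n) :: dlSpec (pre ++ [lb]) rest

theorem length_dlSpec (rest : List String) : ∀ pre, (dlSpec pre rest).length = rest.length := by
  induction rest with
  | nil => intro pre; simp [dlSpec]
  | cons lb rest ih => intro pre; simp [dlSpec, ih]

theorem dlSpec_append (rest : List String) : ∀ pre x,
    dlSpec pre (rest ++ [x]) =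
      dlSpec pre rest ++
        [(if (((pre ++ rest).count x : Int) + 1) == 1 then x
          else x ++ "#" ++ PySem.Int.toStr (((pre ++ rest).count x : Int) + 1))] := by
  induction rest with
  | nil => intro pre x; simp [dlSpec]
  | cons lb rest ih =>
      intro pre x
      simp only [List.cons_append, dlSpec]
      rw [ih (pre ++ [lb]) x]
      simp

-- ===== A-side: the streaming fold computes dlSpec =====
theorem dedupe_foldl_eq (rest : List String) : ∀ (seen : PySem.Dict String Int) (out pre : List String),
    (∀ s, seen.getD s 0 = (pre.count s : Int)) →
    (rest.foldl
      (fun (st : PySem.Dict String Int × List String) lb =>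
        let seen := st.1.insert lb (st.1.getD lb 0 + 1)
        let n := seen.getD lb 0
        (seen, st.2 ++ [if n == 1 then lb else lb ++ "#" ++ PySem.Int.toStr n]))
      (seen, out)).2 = out ++ dlSpec pre rest := by
  induction rest with
  | nil => intro seen out pre _; simp [dlSpec]
  | cons lb rest ih =>
      intro seen out pre hinv
      simp only [List.foldl_cons]
      have hn : (seen.insert lb (seen.getD lb 0 + 1)).getD lb 0 = (pre.count lb : Int) + 1 := by
        rw [PySem.Dict.getD_insert_self, hinv]
      have hinv' : ∀ s, (seen.insert lb (seen.getD lb 0 + 1)).getD s 0 = ((pre ++ [lb]).count s : Int) := by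
        intro s
        rw [PySem.Dict.getD_insert]
        by_cases h : s = lb
        · subst h; simp [hinv, List.count_append]
        · have h' : ¬ lb = s := fun hh => h hh.symm
          simp [h, h', hinv, List.count_append]
      rw [ih _ _ (pre ++ [lb]) hinv']
      simp [dlSpec, hn]

-- ===== B-side helpers =====
-- the positions of label s in labels (as stage 1 records them)
def posOf (labels : List String) (s : String) : List Int :=
  (PySem.List.enumerate labels 0).filterMap (fun p => if p.2 = s then some p.1 else none)

-- the stage-1 dict
def pdict (labels : List String) : PySem.Dict String (List Int) :=
  (PySem.List.enumerate labels 0).foldl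
    (fun (d : PySem.Dict String (List Int)) p => d.modify p.2 [] (fun l => l ++ [p.1]))
    PySem.Dict.empty

-- the name written for the (k+1)-th occurrence of s
def wval (s : String) (k : Int) : String :=
  if k == 0 then s else s ++ "#" ++ PySem.Int.toStr (k + 1)

-- stage 2 flattened into a plain list of (index, value) writes
def flatWrites (items : List (String × List Int)) : List (Int × String) :=
  items.flatMap (fun pr => (PySem.List.enumerate pr.2 0).map (fun q => (q.2, wval pr.1 q.1)))

def applyWrites (ws : List (Int × String)) (out : List String) : List String :=
  ws.foldl (fun o w => PySem.List.pySetD o w.1 w.2) out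

theorem posOf_append (l : List String) (x s : String) :
    posOf (l ++ [x]) s = posOf l s ++ (if s = x then [(l.length : Int)] else []) := by
  unfold posOf
  rw [PySem.List.enumerate_append]
  rw [List.filterMap_append]
  congr 1
  simp only [PySem.List.enumerate, List.filterMap]
  by_cases h : x = s
  · subst h; simp
  · have h' : ¬ s = x := fun hh => h hh.symm
    simp [h, h']

theorem mem_posOf_bounds (l : List String) (s : String) (i : Int) (h : i ∈ posOf l s) :
    0 ≤ i ∧ i < (l.length : Int) := by
  unfold posOf at h
  rw [List.mem_filterMap] at h
  obtain ⟨p, hp, hpi⟩ := h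
  rw [PySem.List.mem_enumerate_iff] at hp
  obtain ⟨k, hk, rfl⟩ := hp
  split at hpi
  · obtain rfl := Option.some.inj hpi
    constructor <;> omega
  · cases hpi

theorem length_posOf (l : List String) (s : String) : (posOf l s).length = l.count s := by
  induction l using List.reverseRecOn with
  | nil => simp [posOf, PySem.List.enumerate]
  | append_singleton l x ih =>
      rw [posOf_append]
      by_cases h : s = x
      · subst h; simp [ih, List.count_append]
      · have h' : ¬ x = s := fun hh => h hh.symm
        simp [h, h', ih, List.count_append]

theorem ofList_append_mem (l : List String) (x : String) (hx : x ∈ l) :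
    PySem.Set.ofList (l ++ [x]) = PySem.Set.ofList l := by
  rw [PySem.Set.ofList_eq_foldl, List.foldl_append, ← PySem.Set.ofList_eq_foldl]
  have h' : x ∈ PySem.Set.ofList l := (PySem.Set.mem_ofList l x).mpr hx
  simp [PySem.Set.add, PySem.Set.contains, h']

theorem ofList_append_not_mem (l : List String) (x : String) (hx : x ∉ l) :
    PySem.Set.ofList (l ++ [x]) = PySem.Set.ofList l ++ [x] := by
  rw [PySem.Set.ofList_eq_foldl, List.foldl_append, ← PySem.Set.ofList_eq_foldl]
  have h' : x ∉ PySem.Set.ofList l := fun h => hx ((PySem.Set.mem_ofList l x).mp h)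
  simp [PySem.Set.add, PySem.Set.contains, h']

theorem posOf_nil_of_not_mem (l : List String) (x : String) (hx : x ∉ l) : posOf l x = [] := by
  have h0 : (posOf l x).length = 0 := by rw [length_posOf]; exact List.count_eq_zero.mpr hx
  exact List.eq_nil_of_length_eq_zero h0

theorem pdict_keys (l : List String) (h : (pdict l).items = (PySem.Set.ofList l).map (fun s => (s, posOf l s))) :
    (pdict l).keys = PySem.Set.ofList l := by
  show List.map (fun p => p.1) (pdict l).items = _
  rw [h, List.map_map]
  have he : List.map ((fun (p : String × List Int) => p.1) ∘ fun s => (s, posOf l s)) (PySem.Set.ofList l)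
      = List.map id (PySem.Set.ofList l) := List.map_congr_left (fun s _ => rfl)
  rw [he, List.map_id]

theorem pdict_items (l : List String) :
    (pdict l).items = (PySem.Set.ofList l).map (fun s => (s, posOf l s)) := by
  induction l using List.reverseRecOn with
  | nil => simp [pdict, PySem.List.enumerate, PySem.Set.ofList_eq_foldl, PySem.Dict.empty]
  | append_singleton l x ih =>
      have hstep : pdict (l ++ [x])
          = (pdict l).modify x [] (fun li => li ++ [(l.length : Int)]) := by
        unfold pdict
        rw [PySem.List.enumerate_append, List.foldl_append]
        simp [PySem.List.enumerate]
      have hkeys := pdict_keys l ih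
      have hnodup : (pdict l).keys.Nodup := by rw [hkeys]; exact PySem.Set.nodup_ofList l
      by_cases hx : x ∈ l
      · -- existing key: in-place overwrite of its position list
        have hmemS : x ∈ PySem.Set.ofList l := (PySem.Set.mem_ofList l x).mpr hx
        have hmemitems : (x, posOf l x) ∈ (pdict l).items := by
          rw [ih]; exact List.mem_map_of_mem hmemS
        have hgetD : (pdict l).getD x [] = posOf l x :=
          PySem.Dict.getD_of_mem_items _ hmemitems hnodup []
        have hcont : (pdict l).contains x = true := by
          rw [PySem.Dict.contains_eq_decide_mem_keys, hkeys]; simpa using hmemS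
        rw [hstep]
        simp only [PySem.Dict.modify]
        rw [hgetD, PySem.Dict.items_insert_of_contains _ _ hcont, ih, List.map_map,
            ofList_append_mem l x hx]
        apply List.map_congr_left
        intro s hs
        by_cases h : s = x
        · subst h; simp [posOf_append]
        · have h' : ¬ s == x := by simpa using h
          simp only [Function.comp_apply]
          rw [if_neg (by simpa using h)]
          rw [posOf_append, if_neg h]
          simp
      · -- fresh key: appended with its singleton position list
        have hnmemS : x ∉ PySem.Set.ofList l := fun h => hx ((PySem.Set.mem_ofList l x).mp h)
        have hcont : (pdict l).contains x = false := by
          rw [PySem.Dict.contains_eq_decide_mem_keys, hkeys]; simpa using hnmemS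
        have hget0 : (pdict l).get? x = none := by
          rw [PySem.Dict.get?_eq_none_iff_not_mem_keys, hkeys]; exact hnmemS
        have hgetD : (pdict l).getD x [] = [] := by simp [PySem.Dict.getD, hget0]
        rw [hstep]
        simp only [PySem.Dict.modify]
        rw [hgetD, PySem.Dict.items_insert_of_not_contains _ _ hcont, ih,
            ofList_append_not_mem l x hx, List.map_append]
        congr 1
        · apply List.map_congr_left
          intro s hs
          have hsl : s ∈ l := (PySem.Set.mem_ofList l s).mp hs
          have h : ¬ s = x := fun hh => hx (hh ▸ hsl)
          rw [posOf_append, if_neg h]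
          simp
        · rw [List.map_singleton, posOf_append, if_pos rfl, posOf_nil_of_not_mem l x hx]

theorem stage2_eq (items : List (String × List Int)) (init : List String) :
    items.foldl
      (fun (out : List String) pr =>
        (PySem.List.enumerate pr.2 0).foldl
          (fun (out2 : List String) q =>
            PySem.List.pySetD out2 q.2
              (if q.1 == 0 then pr.1 else pr.1 ++ "#" ++ PySem.Int.toStr (q.1 + 1)))
          out)
      init = applyWrites (flatWrites items) init := by
  induction items generalizing init with
  | nil => simp [flatWrites, applyWrites]
  | cons pr items ih =>
      rw [List.foldl_cons, ih]
      unfold flatWrites applyWrites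
      rw [List.flatMap_cons, List.foldl_append, List.foldl_map]
      simp [wval]

theorem applyWrites_snoc_slot (ws : List (Int × String)) : ∀ (init : List String) (a : String),
    (∀ w ∈ ws, 0 ≤ w.1 ∧ w.1 < (init.length : Int)) →
    applyWrites ws (init ++ [a]) = applyWrites ws init ++ [a] := by
  induction ws with
  | nil => intro init a _; simp [applyWrites]
  | cons w ws ih =>
      intro init a hb
      obtain ⟨⟨h0, hlt⟩, hrest⟩ := List.forall_mem_cons.mp hb
      unfold applyWrites
      rw [List.foldl_cons, List.foldl_cons]
      have hset : PySem.List.pySetD (init ++ [a]) w.1 w.2 = PySem.List.pySetD init w.1 w.2 ++ [a] := by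
        rw [PySem.List.pySetD_of_nonneg _ _ h0, PySem.List.pySetD_of_nonneg _ _ h0, List.set_append]
        have : w.1.toNat < init.length := by omega
        simp [this]
      rw [hset]
      have := ih (PySem.List.pySetD init w.1 w.2) a
        (by intro w' hw'; rw [PySem.List.length_pySetD]; exact hrest w' hw')
      exact this

theorem applyWrites_comm_fresh (ws : List (Int × String)) : ∀ (X : List String) (n : Int) (v : String),
    0 ≤ n → (∀ w ∈ ws, 0 ≤ w.1 ∧ w.1 ≠ n) →
    applyWrites ws (PySem.List.pySetD X n v) = PySem.List.pySetD (applyWrites ws X) n v := by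
  induction ws with
  | nil => intro X n v _ _; simp [applyWrites]
  | cons w ws ih =>
      intro X n v hn hb
      obtain ⟨⟨h0, hne⟩, hrest⟩ := List.forall_mem_cons.mp hb
      unfold applyWrites
      rw [List.foldl_cons, List.foldl_cons]
      have hswap : PySem.List.pySetD (PySem.List.pySetD X n v) w.1 w.2
          = PySem.List.pySetD (PySem.List.pySetD X w.1 w.2) n v := by
        rw [PySem.List.pySetD_of_nonneg _ _ hn, PySem.List.pySetD_of_nonneg _ _ h0,
            PySem.List.pySetD_of_nonneg _ _ h0, PySem.List.pySetD_of_nonneg _ _ hn]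
        exact List.set_comm _ _ (by omega)
      rw [hswap]
      exact ih (PySem.List.pySetD X w.1 w.2) n v hn hrest

theorem mem_flatWrites_bound (l : List String) (w : Int × String)
    (h : w ∈ flatWrites ((PySem.Set.ofList l).map (fun s => (s, posOf l s)))) :
    0 ≤ w.1 ∧ w.1 < (l.length : Int) := by
  unfold flatWrites at h
  rw [List.mem_flatMap] at h
  obtain ⟨pr, hpr, hw⟩ := h
  rw [List.mem_map] at hpr
  obtain ⟨s, _, rfl⟩ := hpr
  rw [List.mem_map] at hw
  obtain ⟨q, hq, rfl⟩ := hw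
  rw [PySem.List.mem_enumerate_iff] at hq
  obtain ⟨k, hk, rfl⟩ := hq
  exact mem_posOf_bounds l s _ (by simp only []; exact List.getElem_mem hk)

theorem applyWrites_append (a b : List (Int × String)) (init : List String) :
    applyWrites (a ++ b) init = applyWrites b (applyWrites a init) := by
  unfold applyWrites; rw [List.foldl_append]

theorem applyWrites_snoc (ws : List (Int × String)) (w : Int × String) (init : List String) :
    applyWrites (ws ++ [w]) init = PySem.List.pySetD (applyWrites ws init) w.1 w.2 := by
  unfold applyWrites; rw [List.foldl_append]; rfl

theorem setD_last (ys : List String) (v : String) :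
    PySem.List.pySetD (ys ++ [""]) ((ys.length : Int)) v = ys ++ [v] := by
  rw [PySem.List.pySetD_of_nonneg _ _ (Int.natCast_nonneg _)]
  simp

theorem alt_eq_applyWrites (m : List String) :
    dedupe_labels_py_alt m
      = applyWrites (flatWrites ((PySem.Set.ofList m).map (fun s => (s, posOf m s)))) (List.replicate m.length "") := by
  have h0 : dedupe_labels_py_alt m
      = (pdict m).items.foldl
          (fun (out : List String) pr =>
            (PySem.List.enumerate pr.2 0).foldl
              (fun (out2 : List String) q =>
                PySem.List.pySetD out2 q.2
                  (if q.1 == 0 then pr.1 else pr.1 ++ "#" ++ PySem.Int.toStr (q.1 + 1)))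
              out)
          (List.replicate m.length "") := rfl
  rw [h0, stage2_eq, pdict_items]

theorem alt_eq_dlSpec (labels : List String) : dedupe_labels_py_alt labels = dlSpec [] labels := by
  induction labels using List.reverseRecOn with
  | nil => rfl
  | append_singleton l x ih =>
      rw [alt_eq_applyWrites, dlSpec_append]
      have hbound : ∀ w' ∈ flatWrites ((PySem.Set.ofList l).map (fun s => (s, posOf l s))),
          0 ≤ w'.1 ∧ w'.1 < (l.length : Int) := fun w' hw' => mem_flatWrites_bound l w' hw'
      have hold : applyWrites (flatWrites ((PySem.Set.ofList l).map (fun s => (s, posOf l s))))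
          (List.replicate (l.length + 1) "") = dlSpec [] l ++ [""] := by
        rw [List.replicate_succ', applyWrites_snoc_slot _ _ _ (by simpa using hbound),
            ← alt_eq_applyWrites, ih]
      have hlen : (l ++ [x]).length = l.length + 1 := by simp
      rw [hlen]
      by_cases hx : x ∈ l
      · -- x already occurs: its group gains one final write at the new last slot
        obtain ⟨u, w, huw⟩ := List.append_of_mem ((PySem.Set.mem_ofList l x).mpr hx)
        have hnd : (u ++ x :: w).Nodup := huw ▸ PySem.Set.nodup_ofList l
        rw [List.nodup_append] at hnd
        have hxu : x ∉ u := fun h => hnd.2.2 x h x List.mem_cons_self rfl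
        have hxw : x ∉ w := (List.nodup_cons.mp hnd.2.1).1
        have hmapnew : (PySem.Set.ofList (l ++ [x])).map (fun s => (s, posOf (l ++ [x]) s))
            = u.map (fun s => (s, posOf l s))
              ++ (x, posOf l x ++ [(l.length : Int)]) :: w.map (fun s => (s, posOf l s)) := by
          rw [ofList_append_mem l x hx, huw, List.map_append, List.map_cons]
          congr 1
          · exact List.map_congr_left (fun s hs => by
              have h : ¬ s = x := fun hh => hxu (hh ▸ hs)
              rw [posOf_append, if_neg h, List.append_nil])
          congr 1
          · rw [posOf_append, if_pos rfl]
          · exact List.map_congr_left (fun s hs => by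
              have h : ¬ s = x := fun hh => hxw (hh ▸ hs)
              rw [posOf_append, if_neg h, List.append_nil])
        have hmapold : (PySem.Set.ofList l).map (fun s => (s, posOf l s))
            = u.map (fun s => (s, posOf l s))
              ++ (x, posOf l x) :: w.map (fun s => (s, posOf l s)) := by
          rw [huw, List.map_append, List.map_cons]
        have hgx : (PySem.List.enumerate (posOf l x ++ [(l.length : Int)]) 0).map
              (fun q => (q.2, wval x q.1))
            = (PySem.List.enumerate (posOf l x) 0).map (fun q => (q.2, wval x q.1))
              ++ [((l.length : Int), wval x ((posOf l x).length : Int))] := by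
          rw [PySem.List.enumerate_append]
          simp [PySem.List.enumerate]
        have hflatnew : flatWrites ((PySem.Set.ofList (l ++ [x])).map (fun s => (s, posOf (l ++ [x]) s)))
            = (List.flatMap (fun pr => (PySem.List.enumerate pr.2 0).map (fun q => (q.2, wval pr.1 q.1)))
                 (u.map (fun s => (s, posOf l s)))
               ++ (PySem.List.enumerate (posOf l x) 0).map (fun q => (q.2, wval x q.1)))
              ++ ((l.length : Int), wval x ((posOf l x).length : Int))
                :: List.flatMap (fun pr => (PySem.List.enumerate pr.2 0).map (fun q => (q.2, wval pr.1 q.1)))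
                     (w.map (fun s => (s, posOf l s))) := by
          rw [hmapnew]
          unfold flatWrites
          rw [List.flatMap_append, List.flatMap_cons]
          simp only []
          rw [hgx]
          simp [List.append_assoc]
        have hflatold : flatWrites ((PySem.Set.ofList l).map (fun s => (s, posOf l s)))
            = (List.flatMap (fun pr => (PySem.List.enumerate pr.2 0).map (fun q => (q.2, wval pr.1 q.1)))
                 (u.map (fun s => (s, posOf l s)))
               ++ (PySem.List.enumerate (posOf l x) 0).map (fun q => (q.2, wval x q.1)))
              ++ List.flatMap (fun pr => (PySem.List.enumerate pr.2 0).map (fun q => (q.2, wval pr.1 q.1)))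
                   (w.map (fun s => (s, posOf l s))) := by
          rw [hmapold]
          unfold flatWrites
          rw [List.flatMap_append, List.flatMap_cons]
          simp [List.append_assoc]
        have hboundW : ∀ w' ∈ List.flatMap (fun pr => (PySem.List.enumerate pr.2 0).map (fun q => (q.2, wval pr.1 q.1)))
              (w.map (fun s => (s, posOf l s))),
            0 ≤ w'.1 ∧ w'.1 ≠ (l.length : Int) := by
          intro w' hw'
          have hmem : w' ∈ flatWrites ((PySem.Set.ofList l).map (fun s => (s, posOf l s))) := by
            rw [hflatold]; exact List.mem_append_right _ hw'
          obtain ⟨h0, hlt⟩ := hbound w' hmem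
          exact ⟨h0, by omega⟩
        rw [hflatnew, applyWrites_append]
        have hcons : applyWrites
              (((l.length : Int), wval x ((posOf l x).length : Int))
                :: List.flatMap (fun pr => (PySem.List.enumerate pr.2 0).map (fun q => (q.2, wval pr.1 q.1)))
                     (w.map (fun s => (s, posOf l s))))
              (applyWrites
                (List.flatMap (fun pr => (PySem.List.enumerate pr.2 0).map (fun q => (q.2, wval pr.1 q.1)))
                   (u.map (fun s => (s, posOf l s)))
                 ++ (PySem.List.enumerate (posOf l x) 0).map (fun q => (q.2, wval x q.1)))
                (List.replicate (l.length + 1) ""))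
            = PySem.List.pySetD
                (applyWrites (flatWrites ((PySem.Set.ofList l).map (fun s => (s, posOf l s))))
                  (List.replicate (l.length + 1) ""))
                ((l.length : Int)) (wval x ((posOf l x).length : Int)) := by
          show applyWrites _ (applyWrites _ _) = _
          rw [show ∀ (c : List (Int × String)) (X : List String) (nv : Int × String),
                applyWrites (nv :: c) X = applyWrites c (PySem.List.pySetD X nv.1 nv.2)
              from fun c X nv => rfl]
          rw [applyWrites_comm_fresh _ _ _ _ (Int.natCast_nonneg _) hboundW]
          rw [← applyWrites_append, ← hflatold]
        rw [hcons, hold]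
        have hsd := setD_last (dlSpec [] l) (wval x ((posOf l x).length : Int))
        rw [length_dlSpec] at hsd
        rw [hsd]
        have hcpos : 0 < l.count x := List.count_pos_iff.mpr hx
        have hc : (posOf l x).length = l.count x := length_posOf l x
        have h1 : ¬ ((((posOf l x).length : Int)) == 0) = true := by
          simp only [beq_iff_eq]
          omega
        have h2 : ¬ ((((l.count x : Int)) + 1) == 1) = true := by
          simp only [beq_iff_eq]
          omega
        simp only [List.nil_append, wval, if_neg h1, if_neg h2]
        rw [hc]
      · -- fresh label: one new group with a single write in the new last slot
        have hmapnew : (PySem.Set.ofList (l ++ [x])).map (fun s => (s, posOf (l ++ [x]) s))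
            = (PySem.Set.ofList l).map (fun s => (s, posOf l s)) ++ [(x, [(l.length : Int)])] := by
          rw [ofList_append_not_mem l x hx, List.map_append, List.map_singleton, posOf_append,
              if_pos rfl, posOf_nil_of_not_mem l x hx]
          congr 1
          exact List.map_congr_left (fun s hs => by
            have h : ¬ s = x := fun hh => hx (hh ▸ (PySem.Set.mem_ofList l s).mp hs)
            rw [posOf_append, if_neg h, List.append_nil])
        have hflat : flatWrites ((PySem.Set.ofList l).map (fun s => (s, posOf l s)) ++ [(x, [(l.length : Int)])])
            = flatWrites ((PySem.Set.ofList l).map (fun s => (s, posOf l s)))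
              ++ [((l.length : Int), wval x 0)] := by
          unfold flatWrites
          rw [List.flatMap_append]
          simp [PySem.List.enumerate]
        rw [hmapnew, hflat, applyWrites_snoc, hold]
        have hsd := setD_last (dlSpec [] l) (wval x 0)
        rw [length_dlSpec] at hsd
        rw [hsd]
        have hc : l.count x = 0 := List.count_eq_zero.mpr hx
        simp [wval, hc]

-- ===== VERDICT (by name: the statement is the Claim_ definition above) =====
theorem dedupe_labels_py_spec : Claim_equal_dedupe_labels_py := by
  intro labels _
  show dedupe_labels_py labels = dedupe_labels_py_alt labels
  have hA : dedupe_labels_py labels = dlSpec [] labels := by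
    unfold dedupe_labels_py
    rw [dedupe_foldl_eq labels PySem.Dict.empty [] []]
    · simp
    · intro s; simp [PySem.Dict.getD]
  rw [hA, alt_eq_dlSpec]
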